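-- pv_equiv track=rewrite | github.com/raji963/parallel-text-handling-processor | rule_engine.py | score_text
-- ===== SOURCE A (Python) =====
-- POSITIVE_WORDS = ["good", "great", "excellent", "love", "happy"]
--
-- NEGATIVE_WORDS = ["bad", "poor", "terrible", "hate", "problem"]
--
-- def score_text(chunk):
--     """
--     Simple positive/negative word count scoring
--     """
--     words = chunk.lower().split()
--
--     positive_count = 0
--     negative_count = 0
--
--     for word in words:
--         if word in POSITIVE_WORDS:
--             positive_count += 1
--         if word in NEGATIVE_WORDS:
--             negative_count += 1
--
--     return positive_count - negative_count
-- ===== SOURCE B (Python) =====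
-- POSITIVE_WORDS = ["good", "great", "excellent", "love", "happy"]
--
-- NEGATIVE_WORDS = ["bad", "poor", "terrible", "hate", "problem"]
--
-- def score_text(chunk):
--     """
--     Build a frequency table of the words once, then score by iterating
--     over the sentiment word lists instead of over the text.
--     """
--     freq = {}
--     for w in chunk.lower().split():
--         freq[w] = freq.get(w, 0) + 1
--     return sum(freq.get(w, 0) for w in POSITIVE_WORDS) \
--          - sum(freq.get(w, 0) for w in NEGATIVE_WORDS)
-- ===== Notes on version B (the rewrite author's own statement) =====
-- stated objective: alternative
-- what changed: B builds a word-frequency table in one pass and then scores by iterating over the fixed POSITIVE_WORDS/NEGATIVE_WORDS lists, instead of testing each text word for membership in both lists.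
import Mathlib
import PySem

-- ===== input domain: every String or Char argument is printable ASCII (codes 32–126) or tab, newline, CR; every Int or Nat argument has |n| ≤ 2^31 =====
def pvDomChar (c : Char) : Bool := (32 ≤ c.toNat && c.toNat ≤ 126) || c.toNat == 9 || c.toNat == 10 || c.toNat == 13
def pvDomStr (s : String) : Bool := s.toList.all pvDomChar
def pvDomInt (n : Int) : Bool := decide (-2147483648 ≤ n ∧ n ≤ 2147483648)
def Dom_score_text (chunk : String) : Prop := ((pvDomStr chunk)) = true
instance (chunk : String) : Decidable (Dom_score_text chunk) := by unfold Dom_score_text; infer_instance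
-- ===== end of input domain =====

-- B replaces the per-word two-list membership scan by a frequency table queried
-- once per sentiment word (objective: alternative decomposition).

-- ===== PORT A =====
def POSITIVE_WORDS : List String := ["good", "great", "excellent", "love", "happy"]

def NEGATIVE_WORDS : List String := ["bad", "poor", "terrible", "hate", "problem"]

def score_text (chunk : String) : Int :=
  let words := PySem.Str.split₀ (PySem.Str.lower chunk)
  let pn : Int × Int := words.foldl
    (fun pn word =>
      let p := if word ∈ POSITIVE_WORDS then pn.1 + 1 else pn.1
      let n := if word ∈ NEGATIVE_WORDS then pn.2 + 1 else pn.2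
      (p, n)) (0, 0)
  pn.1 - pn.2

-- ===== PORT B =====
def score_text_alt (chunk : String) : Int :=
  let freq : PySem.Dict String Int :=
    (PySem.Str.split₀ (PySem.Str.lower chunk)).foldl
      (fun d w => d.insert w (d.getD w 0 + 1)) PySem.Dict.empty
  POSITIVE_WORDS.foldl (fun s w => s + freq.getD w 0) 0
    - NEGATIVE_WORDS.foldl (fun s w => s + freq.getD w 0) 0

-- ===== PRECONDITION & SPEC =====
def Spec_score_text (chunk : String) (out : Int) : Prop := out = score_text_alt chunk
instance (chunk : String) (out : Int) : Decidable (Spec_score_text chunk out) := by unfold Spec_score_text; infer_instance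

-- ===== CLAIM (what is proved, stated in full; the proofs are below) =====
def Claim_equal_score_text : Prop := ∀ (chunk : String), Dom_score_text chunk → Spec_score_text chunk (score_text chunk)

-- ===== LEMMAS AND PROOFS =====

-- A's pair fold adds the two membership counts to the accumulator.
lemma foldA_eq (ws : List String) (p n : Int) :
    ws.foldl (fun pn word =>
      let p := if word ∈ POSITIVE_WORDS then pn.1 + 1 else pn.1
      let n := if word ∈ NEGATIVE_WORDS then pn.2 + 1 else pn.2
      (p, n)) (p, n)
    = (p + (ws.countP (fun w => decide (w ∈ POSITIVE_WORDS)) : Int),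
       n + (ws.countP (fun w => decide (w ∈ NEGATIVE_WORDS)) : Int)) := by
  induction ws generalizing p n with
  | nil => simp
  | cons w ws ih =>
    simp only [List.foldl_cons, List.countP_cons, ih]
    by_cases hp : w ∈ POSITIVE_WORDS <;> by_cases hn : w ∈ NEGATIVE_WORDS <;>
      simp only [hp, hn, if_true, if_false, decide_true, decide_false,
        Nat.cast_add, Nat.cast_one] <;> exact Prod.ext (by push_cast; ring) (by push_cast; ring)

lemma countP_mem_cons (k : String) (L : List String) (hk : k ∉ L) (ws : List String) :
    ws.countP (fun w => decide (w ∈ k :: L))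
    = ws.count k + ws.countP (fun w => decide (w ∈ L)) := by
  induction ws with
  | nil => simp
  | cons w ws ihw =>
    simp only [List.countP_cons, List.count_cons, ihw]
    by_cases hwk : w = k
    · subst hwk; simp [hk]; omega
    · by_cases hwL : w ∈ L <;> simp [hwk, hwL] <;> omega

-- counting membership in a duplicate-free key list = summing per-key counts
lemma countP_mem_eq (L : List String) (hL : L.Nodup) (ws : List String) (s : Int) :
    L.foldl (fun s k => s + (ws.count k : Int)) s
    = s + (ws.countP (fun w => decide (w ∈ L)) : Int) := by
  induction L generalizing s with
  | nil => simp
  | cons k L ih =>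
    have hk : k ∉ L := (List.nodup_cons.mp hL).1
    rw [List.foldl_cons, ih (List.nodup_cons.mp hL).2, countP_mem_cons k L hk ws]
    push_cast; ring

lemma score_alt_eq (chunk : String) :
    score_text_alt chunk
    = ((PySem.Str.split₀ (PySem.Str.lower chunk)).countP
         (fun w => decide (w ∈ POSITIVE_WORDS)) : Int)
      - ((PySem.Str.split₀ (PySem.Str.lower chunk)).countP
         (fun w => decide (w ∈ NEGATIVE_WORDS)) : Int) := by
  unfold score_text_alt
  simp only [PySem.Dict.getD_foldl_insert_add_one, PySem.Dict.getD_empty, zero_add]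
  rw [countP_mem_eq POSITIVE_WORDS (by decide) _ 0,
      countP_mem_eq NEGATIVE_WORDS (by decide) _ 0]
  ring

-- ===== VERDICT (by name: the statement is the Claim_ definition above) =====
theorem score_text_spec : Claim_equal_score_text := by
  intro chunk _
  show score_text chunk = score_text_alt chunk
  rw [score_alt_eq]
  unfold score_text
  simp only [foldA_eq, zero_add]
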